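-- pv_equiv track=rewrite | github.com/yingxiul/DecisionTree | decisionTree.py | split_feats
-- ===== SOURCE A (Python) =====
-- def split_feats(feats, source, tag):
--     n_d = dict()
--     y_d = dict()
--
--     for key in feats:
--         n_d[key] = list()
--         y_d[key] = list()
--         for i in range(len(source)):
--             if (source[i] == tag[0]):
--                 n_d[key].append(feats[key][i])
--             else:
--                 y_d[key].append(feats[key][i])
--
--     return [n_d,y_d]
-- ===== SOURCE B (Python) =====
-- def split_feats(feats, source, tag):
--     # Partition the index set once, then build each key's two rows by indexing.
--     first = tag[0] if tag else None
--     n_idx, y_idx = [], []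
--     for i, s in enumerate(source):
--         (n_idx if s == first else y_idx).append(i)
--     n_d = {k: [v[i] for i in n_idx] for k, v in feats.items()}
--     y_d = {k: [v[i] for i in y_idx] for k, v in feats.items()}
--     return [n_d, y_d]
-- ===== Notes on version B (the rewrite author's own statement) =====
-- stated objective: simpler
-- what changed: B scans source once to partition the index set into n_idx/y_idx and then builds each key's two rows by direct indexing (dict comprehensions), instead of A's per-key inner loop that re-tests source[i]==tag[0] and appends into dict entries.
import Mathlib
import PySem

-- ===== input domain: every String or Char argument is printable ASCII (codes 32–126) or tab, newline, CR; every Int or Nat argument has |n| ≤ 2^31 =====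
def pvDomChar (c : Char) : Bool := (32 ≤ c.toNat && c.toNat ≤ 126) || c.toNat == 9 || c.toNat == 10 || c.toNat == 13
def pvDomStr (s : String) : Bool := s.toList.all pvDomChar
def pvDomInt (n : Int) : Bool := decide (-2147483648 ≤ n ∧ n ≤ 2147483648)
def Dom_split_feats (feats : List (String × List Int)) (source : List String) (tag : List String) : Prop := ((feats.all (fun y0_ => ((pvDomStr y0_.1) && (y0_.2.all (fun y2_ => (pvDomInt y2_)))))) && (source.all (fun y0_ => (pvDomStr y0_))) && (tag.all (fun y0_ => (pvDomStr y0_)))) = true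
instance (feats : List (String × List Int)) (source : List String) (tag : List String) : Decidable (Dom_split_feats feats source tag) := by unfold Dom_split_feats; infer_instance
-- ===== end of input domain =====

-- B partitions the indices of `source` once into two index lists and builds each key's
-- two rows by direct indexing, instead of A's per-key inner loop re-testing the tag; simpler.


-- ===== PORT A =====
def split_feats (feats : List (String × List Int)) (source : List String) (tag : List String) : List (List (String × List Int)) :=
  let st :=
    feats.foldl
      (fun (st : PySem.Dict String (List Int) × PySem.Dict String (List Int)) kv =>
        -- n_d[key] = list(); y_d[key] = list()
        let st0 := (st.1.insert kv.1 ([] : List Int), st.2.insert kv.1 ([] : List Int))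
        -- for i in range(len(source)): …  (feats[key] is kv.2: Pre_ keeps feature keys unique)
        (PySem.List.pyRange 0 (source.length : Int) 1).foldl
          (fun st i =>
            if PySem.List.pyGetD source i "" == (PySem.List.pyGet? tag 0).getD "" then
              (st.1.modify kv.1 [] (fun l => l ++ [PySem.List.pyGetD kv.2 i 0]), st.2)
            else
              (st.1, st.2.modify kv.1 [] (fun l => l ++ [PySem.List.pyGetD kv.2 i 0])))
          st0)
      ((PySem.Dict.empty : PySem.Dict String (List Int)), (PySem.Dict.empty : PySem.Dict String (List Int)))
  [st.1.items, st.2.items]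

-- ===== PORT B =====
def split_feats_alt (feats : List (String × List Int)) (source : List String) (tag : List String) : List (List (String × List Int)) :=
  -- first = tag[0] if tag else None
  let first : Option String := PySem.List.pyGet? tag 0
  let idx :=
    (PySem.List.enumerate source).foldl
      (fun (p : List Int × List Int) is =>
        if some is.2 == first then (p.1 ++ [is.1], p.2) else (p.1, p.2 ++ [is.1]))
      ([], [])
  let n_d := feats.map (fun kv => (kv.1, idx.1.map (fun i => PySem.List.pyGetD kv.2 i 0)))
  let y_d := feats.map (fun kv => (kv.1, idx.2.map (fun i => PySem.List.pyGetD kv.2 i 0)))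
  [n_d, y_d]

-- ===== PRECONDITION & SPEC =====
-- Pre_ excludes exactly: inputs where Python A raises IndexError (an empty tag reached from
-- nonempty feats and nonempty source, or a feature row shorter than a nonempty source), and
-- duplicate feature keys, which cannot occur in A's dict argument.
def Pre_split_feats (feats : List (String × List Int)) (source : List String) (tag : List String) : Prop :=
  (feats.map Prod.fst).Nodup ∧
    (feats = [] ∨ source = [] ∨ (tag ≠ [] ∧ ∀ p ∈ feats, source.length ≤ p.2.length))
instance (feats : List (String × List Int)) (source : List String) (tag : List String) : Decidable (Pre_split_feats feats source tag) := by unfold Pre_split_feats; infer_instance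
def pvWitness_split_feats : (List (String × List Int)) × List String × List String :=
  ([("a", [1, 2]), ("b", [3, 4])], ["x", "y"], ["x"])

def Spec_split_feats (feats : List (String × List Int)) (source : List String) (tag : List String) (out : List (List (String × List Int))) : Prop := out = split_feats_alt feats source tag
instance (feats : List (String × List Int)) (source : List String) (tag : List String) (out : List (List (String × List Int))) : Decidable (Spec_split_feats feats source tag out) := by unfold Spec_split_feats; infer_instance

-- ===== CLAIM (what is proved, stated in full; the proofs are below) =====
def Claim_equal_split_feats : Prop := ∀ (feats : List (String × List Int)) (source : List String) (tag : List String), Dom_split_feats feats source tag → Pre_split_feats feats source tag → Spec_split_feats feats source tag (split_feats feats source tag)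

-- ===== LEMMAS AND PROOFS =====

-- modify on a key just inserted rewrites that entry in place
theorem pv_modify_insert {κ ν : Type} [BEq κ] [LawfulBEq κ] (d : PySem.Dict κ ν) (k : κ) (l : ν) (dflt : ν) (f : ν → ν) :
    (d.insert k l).modify k dflt f = d.insert k (f l) := by
  simp only [PySem.Dict.modify, PySem.Dict.getD_insert_self, PySem.Dict.insert_insert_self]

-- A's inner loop over indices only ever rewrites key k's freshly inserted entry
theorem pv_inner_loop (c : Int → Bool) (x : Int → Int) (k : String)
    (L : List Int) (d1 d2 : PySem.Dict String (List Int)) (l1 l2 : List Int) :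
    L.foldl
      (fun (st : PySem.Dict String (List Int) × PySem.Dict String (List Int)) i =>
        if c i then (st.1.modify k [] (fun l => l ++ [x i]), st.2)
        else (st.1, st.2.modify k [] (fun l => l ++ [x i])))
      (d1.insert k l1, d2.insert k l2)
    = (d1.insert k (l1 ++ (L.filter c).map x),
       d2.insert k (l2 ++ (L.filter (fun i => !c i)).map x)) := by
  induction L generalizing l1 l2 with
  | nil => simp
  | cons i L ih =>
    rw [List.foldl_cons]
    by_cases h : c i
    · rw [if_pos h]
      simp only [pv_modify_insert]
      rw [ih (l1 ++ [x i]) l2]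
      simp [h]
    · rw [if_neg h]
      simp only [pv_modify_insert]
      rw [ih l1 (l2 ++ [x i])]
      simp [h]

-- A's outer fold is componentwise a fold of plain inserts of the finished rows
theorem pv_outer_fold (source tag : List String) (feats : List (String × List Int))
    (d1 d2 : PySem.Dict String (List Int)) :
    feats.foldl
      (fun (st : PySem.Dict String (List Int) × PySem.Dict String (List Int)) kv =>
        let st0 := (st.1.insert kv.1 ([] : List Int), st.2.insert kv.1 ([] : List Int))
        (PySem.List.pyRange 0 (source.length : Int) 1).foldl
          (fun st i =>
            if PySem.List.pyGetD source i "" == (PySem.List.pyGet? tag 0).getD "" then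
              (st.1.modify kv.1 [] (fun l => l ++ [PySem.List.pyGetD kv.2 i 0]), st.2)
            else
              (st.1, st.2.modify kv.1 [] (fun l => l ++ [PySem.List.pyGetD kv.2 i 0])))
          st0)
      (d1, d2)
    = (feats.foldl (fun d kv => d.insert kv.1
         (((PySem.List.pyRange 0 (source.length : Int) 1).filter
             (fun i => PySem.List.pyGetD source i "" == (PySem.List.pyGet? tag 0).getD "")).map
           (fun i => PySem.List.pyGetD kv.2 i 0))) d1,
       feats.foldl (fun d kv => d.insert kv.1
         (((PySem.List.pyRange 0 (source.length : Int) 1).filter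
             (fun i => !(PySem.List.pyGetD source i "" == (PySem.List.pyGet? tag 0).getD ""))).map
           (fun i => PySem.List.pyGetD kv.2 i 0))) d2) := by
  induction feats generalizing d1 d2 with
  | nil => simp
  | cons kv feats ih =>
    simp only [List.foldl_cons]
    rw [pv_inner_loop (fun i => PySem.List.pyGetD source i "" == (PySem.List.pyGet? tag 0).getD "")
      (fun i => PySem.List.pyGetD kv.2 i 0) kv.1 _ d1 d2 [] []]
    simp only [List.nil_append]
    exact ih _ _

theorem pv_enumerate_eq (xs : List String) (s : Int) :
    PySem.List.enumerate xs s
      = (PySem.List.pyRange s (s + xs.length) 1).map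
          (fun i => (i, PySem.List.pyGetD xs (i - s) "")) := by
  induction xs generalizing s with
  | nil => simp [PySem.List.enumerate_nil, PySem.List.pyRange_one_eq_nil (le_refl s)]
  | cons x xs ih =>
    rw [PySem.List.enumerate_cons,
      PySem.List.pyRange_one_cons (by simp only [List.length_cons]; push_cast; omega : s < s + ((x :: xs).length : Int))]
    rw [List.map_cons]
    congr 1
    · simp [PySem.List.pyGetD_zero_cons]
    · rw [ih (s + 1)]
      have hb : s + ((x :: xs).length : Int) = (s + 1) + (xs.length : Int) := by
        simp only [List.length_cons]; push_cast; omega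
      rw [hb]
      apply List.map_congr_left
      intro i hi
      rw [PySem.List.mem_pyRange_one] at hi
      have h1 : PySem.List.pyGetD xs (i - (s + 1)) "" = xs[(i - (s + 1)).toNat] :=
        PySem.List.pyGetD_eq_getElem xs "" (by omega) (by omega)
      have h2 : PySem.List.pyGetD (x :: xs) (i - s) "" = (x :: xs)[(i - s).toNat] :=
        PySem.List.pyGetD_eq_getElem (x :: xs) "" (by omega) (by simp only [List.length_cons]; push_cast; omega)
      rw [Prod.ext_iff]
      refine ⟨rfl, ?_⟩
      rw [h1, h2]
      have ht : (i - s).toNat = (i - (s + 1)).toNat + 1 := by omega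
      simp [ht]

-- B's index-partition loop yields exactly the two filtered index ranges
theorem pv_pair_fold (q : Int × String → Bool) (l : List (Int × String)) (l1 l2 : List Int) :
    l.foldl
      (fun (p : List Int × List Int) is =>
        if q is then (p.1 ++ [is.1], p.2) else (p.1, p.2 ++ [is.1]))
      (l1, l2)
    = (l1 ++ (l.filter q).map Prod.fst, l2 ++ (l.filter (fun is => !q is)).map Prod.fst) := by
  induction l generalizing l1 l2 with
  | nil => simp
  | cons is l ih =>
    rw [List.foldl_cons]
    by_cases h : q is
    · rw [if_pos h, ih]
      simp [h]
    · rw [if_neg h, ih]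
      simp [h]

theorem pv_idx_eq (source : List String) (t? : Option String) :
    (PySem.List.enumerate source).foldl
      (fun (p : List Int × List Int) is =>
        if some is.2 == t? then (p.1 ++ [is.1], p.2) else (p.1, p.2 ++ [is.1]))
      ([], [])
    = ((PySem.List.pyRange 0 (source.length : Int) 1).filter
         (fun i => some (PySem.List.pyGetD source i "") == t?),
       (PySem.List.pyRange 0 (source.length : Int) 1).filter
         (fun i => !(some (PySem.List.pyGetD source i "") == t?))) := by
  rw [pv_pair_fold (fun is => some is.2 == t?)]
  rw [pv_enumerate_eq source 0]
  simp only [zero_add, List.filter_map, List.map_map]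
  rw [Prod.ext_iff]
  constructor <;> · simp [Function.comp_def]

-- ===== VERDICT (by name: the statement is the Claim_ definition above) =====
theorem split_feats_spec : Claim_equal_split_feats := by
  intro feats source tag _hdom hpre
  obtain ⟨hnd, hcase⟩ := hpre
  unfold Spec_split_feats split_feats split_feats_alt
  rw [pv_outer_fold source tag feats PySem.Dict.empty PySem.Dict.empty]
  simp only
  rw [pv_idx_eq source (PySem.List.pyGet? tag 0)]
  rw [PySem.Dict.items_foldl_insert_fresh feats Prod.fst _ PySem.Dict.empty
        (fun a _ => PySem.Dict.contains_empty a.1) hnd,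
      PySem.Dict.items_foldl_insert_fresh feats Prod.fst _ PySem.Dict.empty
        (fun a _ => PySem.Dict.contains_empty a.1) hnd]
  rcases hcase with hf | hs | ⟨ht, -⟩
  · subst hf; rfl
  · subst hs
    simp [PySem.Dict.empty]
  · cases tag with
    | nil => exact absurd rfl ht
    | cons t ts => simp [PySem.List.pyGet?, PySem.List.pyIdx?, PySem.Dict.empty]
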